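-- pv_equiv track=rewrite | github.com/R-Grigala/TSU_workshop | Modeling/Lab_16.py | get_period
-- ===== SOURCE A (Python) =====
-- def quadratic_generator(z_prev):
--     """
--     ეს ფუნქცია გამოთვლის შემდეგ მნიშვნელობას კვადრატული კონგრუენტული გენერატორისთვის:
--     z_i = (11 * z_{i-1}^2 + 7 * z_{i-1} + 3) mod 16
--     გამოიყენება ბიტური ოპერაცია (& 15) mod 16-ის ნაცვლად, რადგან 16=2^4 და & (16-1) იძლევა mod 16-ს დადებითი რიცხვებისთვის.
--     """
--     return (11 * z_prev * z_prev + 7 * z_prev + 3) & 15  # ბიტური AND 15-ით mod 16-ის გამოსათვლელად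
--
-- def get_period(seed):
--     """
--     დამხმარე ფუნქცია პერიოდის გამოსათვლელად მოცემული საწყისი მნიშვნელობისთვის.
--     იყენებს ლექსიკონს (dictionary) განმეორების აღმოსაჩენად.
--     """
--     seen = {}  # შენახული მდგომარეობები და მათი ნაბიჯები
--     z = seed
--     step = 0
--     while z not in seen:
--         seen[z] = step
--         z = quadratic_generator(z)
--         step += 1
--     return step - seen[z]  # პერიოდის სიგრძე
-- ===== SOURCE B (Python) =====
-- def get_period(seed):
--     # Floyd cycle detection: no dict/set, only two pointers and a counter.
--     def f(z):
--         return (11 * z * z + 7 * z + 3) & 15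
--
--     # Phase 1: find a meeting point inside the cycle.
--     slow = f(seed)
--     fast = f(f(seed))
--     while slow != fast:
--         slow = f(slow)
--         fast = f(f(fast))
--     # Phase 2: walk once around the cycle from the meeting point.
--     length = 1
--     slow = f(fast)
--     while slow != fast:
--         slow = f(slow)
--         length += 1
--     return length
-- ===== Notes on version B (the rewrite author's own statement) =====
-- stated objective: alternative
-- what changed: Replaced the memo-dictionary rho loop (store every state with its step, return step - seen[z] at the first repeat) with Floyd's two-pointer cycle detection: phase 1 advances slow/fast pointers until they meet inside the cycle, phase 2 walks once around the cycle counting its length; no dict or set is kept, only two ints and a counter.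
import Mathlib
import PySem

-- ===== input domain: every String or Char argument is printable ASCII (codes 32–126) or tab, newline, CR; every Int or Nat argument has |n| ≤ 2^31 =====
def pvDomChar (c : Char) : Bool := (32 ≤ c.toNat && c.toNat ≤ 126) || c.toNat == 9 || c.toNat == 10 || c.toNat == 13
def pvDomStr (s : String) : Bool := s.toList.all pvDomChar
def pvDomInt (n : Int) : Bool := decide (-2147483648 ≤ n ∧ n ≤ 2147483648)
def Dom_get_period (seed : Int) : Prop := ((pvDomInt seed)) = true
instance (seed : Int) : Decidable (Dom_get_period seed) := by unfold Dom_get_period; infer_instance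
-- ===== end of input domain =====

-- B replaces A's memo-dictionary rho loop with Floyd's two-pointer cycle detection (no dict, O(1) state); same return value.

-- ===== PORT A =====
-- `n & 15` ported exactly with PySem.Int.band (Python-exact on negatives).
def quadratic_generator (z_prev : Int) : Int :=
  PySem.Int.band (11 * z_prev * z_prev + 7 * z_prev + 3) 15

-- A's while-loop: fuel-bounded structural recursion over the same state (seen, z, step).
-- The loop visits at most 17 distinct states (seed plus the 16 residues), so fuel 32 is never exhausted.
def goA (seen : PySem.Dict Int Int) (z : Int) (step : Int) : Nat → Int
  | 0 => 0
  | fuel + 1 =>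
    match seen.get? z with
    | some s => step - s
    | none => goA (seen.insert z step) (quadratic_generator z) (step + 1) fuel

def get_period (seed : Int) : Int := goA PySem.Dict.empty seed 0 32

-- ===== PORT B =====
-- Source B's local `f`, same `& 15` port.
def pyf (z : Int) : Int := PySem.Int.band (11 * z * z + 7 * z + 3) 15

-- Phase 1 of Floyd: advance slow one step, fast two, until they meet.
-- After one step all states lie in [0,16), so meeting happens within 16 iterations; fuel 32 is never exhausted.
def floydMeet (slow fast : Int) : Nat → Int
  | 0 => slow
  | fuel + 1 => if slow = fast then slow else floydMeet (pyf slow) (pyf (pyf fast)) fuel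

-- Phase 2: walk once around the cycle from the meeting point, counting.
def cycleLen (slow fast : Int) (len : Int) : Nat → Int
  | 0 => len
  | fuel + 1 => if slow = fast then len else cycleLen (pyf slow) fast (len + 1) fuel

def get_period_alt (seed : Int) : Int :=
  let m := floydMeet (pyf seed) (pyf (pyf seed)) 32
  cycleLen (pyf m) m 1 32

-- ===== PRECONDITION & SPEC =====
def Spec_get_period (seed : Int) (out : Int) : Prop := out = get_period_alt seed
instance (seed : Int) (out : Int) : Decidable (Spec_get_period seed out) := by unfold Spec_get_period; infer_instance

-- ===== CLAIM (what is proved, stated in full; the proofs are below) =====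
def Claim_equal_get_period : Prop := ∀ (seed : Int), Dom_get_period seed → Spec_get_period seed (get_period seed)

-- ===== LEMMAS AND PROOFS =====

-- Python's `n & 15` is `n mod 16` (floored mod), for every integer n.
theorem band15 (a : Int) : PySem.Int.band a 15 = a % 16 := by
  have h15 : ∀ m : Nat, m &&& 15 = m % 16 := by
    intro m
    have := Nat.and_two_pow_sub_one_eq_mod m 4
    norm_num at this; omega
  unfold PySem.Int.band
  by_cases h : 0 ≤ a
  · simp only [h, if_true, show (0:Int) ≤ 15 by norm_num,
      show Int.toNat 15 = 15 from rfl, h15]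
    omega
  · simp only [h, if_false, show (0:Int) ≤ 15 by norm_num, if_true,
      show Int.toNat 15 = 15 from rfl]
    rw [Nat.land_comm, h15]
    omega

theorem pyf_eq_qg (z : Int) : pyf z = quadratic_generator z := rfl

-- the generator only depends on the argument mod 16
theorem qg_congr (a b : Int) (h : a % 16 = b % 16) :
    quadratic_generator a = quadratic_generator b := by
  unfold quadratic_generator
  rw [band15, band15]
  have ha : a ≡ b [ZMOD 16] := h
  exact (((ha.mul_left 11).mul ha).add (ha.mul_left 7)).add_right 3

theorem qg_range (z : Int) : 0 ≤ quadratic_generator z ∧ quadratic_generator z < 16 := by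
  unfold quadratic_generator
  rw [band15]
  exact ⟨Int.emod_nonneg _ (by norm_num), Int.emod_lt_of_pos _ (by norm_num)⟩

-- A's loop gives the same answer from two dictionaries that agree on all keys in [0,16),
-- as long as the current state is in [0,16) (all later states are, by qg_range).
theorem goA_congr : ∀ (fuel : Nat) (d1 d2 : PySem.Dict Int Int) (z step : Int),
    (∀ w : Int, 0 ≤ w → w < 16 → d1.get? w = d2.get? w) →
    0 ≤ z → z < 16 → goA d1 z step fuel = goA d2 z step fuel := by
  intro fuel
  induction fuel with
  | zero => intro _ _ _ _ _ _ _; rfl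
  | succ n ih =>
    intro d1 d2 z step hagree hz1 hz2
    unfold goA
    rw [hagree z hz1 hz2]
    cases hd : d2.get? z with
    | some s => rfl
    | none =>
      apply ih
      · intro w hw1 hw2
        rw [PySem.Dict.get?_insert, PySem.Dict.get?_insert]
        split
        · rfl
        · exact hagree w hw1 hw2
      · exact (qg_range z).1
      · exact (qg_range z).2

-- one step of A's loop when the state is not yet memoised
theorem goA_step (d : PySem.Dict Int Int) (z step : Int) (fuel : Nat) (h : d.get? z = none) :
    goA d z step (fuel + 1) = goA (d.insert z step) (quadratic_generator z) (step + 1) fuel := by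
  rw [goA, h]

-- unroll A's first iteration (the empty dict contains nothing)
theorem A_unfold1 (seed : Int) :
    get_period seed = goA (PySem.Dict.empty.insert seed 0) (quadratic_generator seed) 1 31 := by
  show goA PySem.Dict.empty seed 0 (31 + 1) = _
  rw [goA_step _ _ _ _ (PySem.Dict.get?_empty _)]
  norm_num

-- seeds already in [0,16): 16 closed computations
theorem inrange_case : ∀ s : Int, 0 ≤ s → s < 16 → get_period s = get_period_alt s := by
  intro s h1 h2
  interval_cases s <;> decide

-- canonical out-of-range representatives [16,32): 16 closed computations
theorem shifted_case : ∀ r : Int, 0 ≤ r → r < 16 → get_period (r + 16) = get_period_alt (r + 16) := by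
  intro r h1 h2
  interval_cases r <;> decide

-- ===== VERDICT (by name: the statement is the Claim_ definition above) =====
theorem get_period_spec : Claim_equal_get_period := by
  unfold Claim_equal_get_period Spec_get_period
  intro seed _
  by_cases h : 0 ≤ seed ∧ seed < 16
  · exact inrange_case seed h.1 h.2
  · push Not at h
    have hr1 : 0 ≤ seed % 16 := Int.emod_nonneg _ (by norm_num)
    have hr2 : seed % 16 < 16 := Int.emod_lt_of_pos _ (by norm_num)
    have hmod : seed % 16 = (seed % 16 + 16) % 16 := by omega
    have hq : quadratic_generator seed = quadratic_generator (seed % 16 + 16) :=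
      qg_congr _ _ (by omega)
    have hA : get_period seed = get_period (seed % 16 + 16) := by
      rw [A_unfold1, A_unfold1, hq]
      apply goA_congr
      · intro w hw1 hw2
        rw [PySem.Dict.get?_insert, PySem.Dict.get?_insert]
        rw [if_neg (by omega), if_neg (by omega)]
      · exact (qg_range _).1
      · exact (qg_range _).2
    have hq' : pyf (seed % 16 + 16) = pyf seed := by
      rw [pyf_eq_qg, pyf_eq_qg]; exact hq.symm
    have hB : get_period_alt (seed % 16 + 16) = get_period_alt seed := by
      unfold get_period_alt
      rw [hq']
    rw [hA, shifted_case _ hr1 hr2, hB]
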